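/- GENERATED by mk_final_copies.py from the proof of the farm's unit `compute_codewords.9` (farm:compute_codewords.9.1: Proof.lean) as the
   re-elaboration sweep compiled it — do not edit. -/
import Asan.CheckWalk
import Vorbis.Spec.Units.compute_codewords_9

/- THE WORKED PROOF OF THE UNIT compute_codewords.9 (segment 9 of the split of `compute_codewords`): from the head of loop 1150
   (`cut9` 0x108373, assertion `AtProp i z`) through the loop `for (y = len[i]; y > z; --y) available[y] = res + (1 << (32 - y));`
   (its check site 0x108392 by `cw_check_available`), the reload of `m + 1` (0x1083a2) and the `++i` of the main loop's back edge
   (0x108341) to the head of the main loop (`cut8` 0x108345, assertion `AtMain (i + 1)`). `cw9_walk` is the farm worker's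
   continuation-passing walk (its `seg7`); the unit theorem feeds it the fields of `AtProp` and rebuilds `AtMain` at the exit. -/
open X86 X86.User Asan Vorbis Vorbis.Spec
open Vorbis.Spec.compute_codewords

set_option maxRecDepth 4000
set_option maxHeartbeats 4000000

namespace Vorbis.Spec.compute_codewords_9

/-- **SEGMENT 7: cut9 0x108373 → loop 1150 `for (y = len[i]; y > z; --y) available[y] = res + (1 << (32 - y));` → 0x1083a2 →
the back edge 0x108341 of the main loop → cut8 0x108345** -/
theorem cw9_walk {Lay : Layout} (hLay : Lay.hi = 0x1000000) {μ : Microarch} (hμ : UserX.MicroOK μ) {u₀ : State}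
    (hcode : HasCodeNat Lay u₀ Vorbis.L.compute_codewords.entry Vorbis.Code.code_compute_codewords.nat Vorbis.L.compute_codewords.size)
    (hstore4 : Asan.SmallCheck Lay μ Vorbis.WayInv (Vorbis.CodeOK u₀) [.rax, .rcx, .rdx] 4 Vorbis.L.__asan_store4_noabort.entry)
    {others : List Obj} {frames : List (Nat × FrameLayout)} {u : State} {ret : Word}
    (hinvB : ShadowInv others (((u.reg .rsp).toNat - 248, Vorbis.Frames.compute_codewords) :: frames)
      ((u.reg .rsp).toNat - 296) (cw_poisonedMem u))
    (he_room : 7340032 + 400 ≤ (u.reg .rsp).toNat)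
    (he_top : (u.reg .rsp).toNat + 8 ≤ 8388608) (he_stack : Lay.Has (u.reg .rsp - 400) 408)
    {s : State} {ws : List Span} (i z y0 M : Nat) (R : Word)
    (w_rip : s.rip = Vorbis.L.compute_codewords.cut9) (w_rbx : s.reg .rbx = Word.ofBV (BitVec.ofNat 32 z))
    (w_r12 : s.reg .r12 = Word.ofBV (BitVec.ofNat 32 y0)) (w_r13 : s.reg .r13 = Word.ofBV (BitVec.ofNat 32 i))
    (w_r14 : s.reg .r14 = R) (hz : 1 ≤ z) (hz31 : z ≤ 31) (hy0 : y0 ≤ 31)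
    (w_kept : RegsKept cw_allRegs u s) (hb : CwBody u₀ u ret ws s)
    (hslot : UInt64.ofNat (s.mem.readLE (u.reg .rsp - 256) 8) = (u.reg .rsp - 248) >>> 3)
    (hslotM : s.mem.readLE (u.reg .rsp - 276) 4 = M)
    {Q : State → Prop}
    (hcont : ∀ s' : State, s'.rip = Vorbis.L.compute_codewords.cut8 →
      s'.reg .r13 = Word.ofBV (BitVec.ofNat 32 i + 1#32) → s'.reg .r12 = Word.ofBV (BitVec.ofNat 32 M) →
      UInt64.ofNat (s'.mem.readLE (u.reg .rsp - 256) 8) = (u.reg .rsp - 248) >>> 3 →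
      Mem.SameExcept [⟨(u.reg .rsp).toNat - 304, (u.reg .rsp).toNat - 296⟩, ⟨(u.reg .rsp).toNat - 216, (u.reg .rsp).toNat - 88⟩]
        s.mem s'.mem →
      CwBody u₀ u ret ws s' → ReachVia Lay μ Vorbis.WayInv s' Q) :
    ReachVia Lay μ Vorbis.WayInv s Q := by
  obtain ⟨w_rsp, w_eq, hdf, hmx, hsame, hbody, hs0, hs1, hs2, hs3, hs4, hs5, hs6, hsLen, hsC, hsVal, hsN⟩ := hb
  unfold cw_allRegs at w_kept
  obtain ⟨m0, hm0⟩ : ∃ m0 : Mem, m0 = s.mem := ⟨_, rfl⟩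
  rw [← hm0] at hcont
  -- 0x108373: the head of loop 1150
  obtain ⟨y, hy12, hyle, hE0⟩ : ∃ y : Nat, s.reg .r12 = Word.ofBV (BitVec.ofNat 32 y) ∧ y ≤ y0 ∧
      Mem.SameExcept [⟨(u.reg .rsp).toNat - 304, (u.reg .rsp).toNat - 296⟩, ⟨(u.reg .rsp).toNat - 216, (u.reg .rsp).toNat - 88⟩]
        m0 s.mem :=
    ⟨y0, w_r12, Nat.le_refl _, by rw [hm0]; exact Mem.SameExcept.refl _ _⟩
  have h0rsp := w_rsp
  have h0eq := w_eq
  clear w_r12 hm0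
  u_loop [y] (fun v => (v.reg .r12).toNat)
  u_walk hcode [hμ.vendor] until [Vorbis.L.compute_codewords.loop5, Vorbis.L.compute_codewords.cut8] span [Vorbis.L.textLo, Vorbis.L.textHi] side (v_side)
  · -- check_108392: `available[y]`, `z < y ≤ len[i] ≤ 31`
    have hun : ShadowUntouched (cw_poisonedMem u) s_108392.mem := by
      rw [w_mem]
      exact Mem.EqOn.step_writeLE _ _ _ hbody (by u_omega) (by u_omega)
    exact cw_check_available (u.reg .rsp).toNat hinvB hun (by omega) _ y (by omega)
      (cw_avail_addr (u.reg .rsp) y (by omega) he_room he_top)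
  · -- side_code: the store to `available[y]` misses the text
    have hA := cw_avail_addr (u.reg .rsp) y (by omega) he_room he_top
    omega
  · -- `y ≤ z`: the exit 0x1083a2 (`m` reloaded), the back edge 0x108341 of the main loop (`++i`), cut8
    have hbK : CwBody u₀ u ret ws s :=
      ⟨h0rsp, h0eq, hdf, hmx, hsame, hbody, hs0, hs1, hs2, hs3, hs4, hs5, hs6, hsLen, hsC, hsVal, hsN⟩
    have hE : Mem.EqOn ((u.reg .rsp).toNat - 296) ((u.reg .rsp).toNat + 8) s.mem s_108341.mem := by
      rw [w_mem]
      exact Mem.EqOn.refl _ _ _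
    have hi : X86.User.abiInv s_108341 := by
      v_inv
    refine (hcont s_108341 w_rip w_r13 w_r12 (by rw [w_mem]; exact hslot) (by rw [w_mem]; exact hE0)
      (hbK.carry hE he_room he_top w_rsp w_eq hi.1 hi.2 (by rw [w_mem]; exact hsame)
        (by rw [w_mem]; exact hbody))).mono (fun v h => Or.inl h)
  · -- the back edge: `y > z ≥ 1`
    have hzy : z < y := by
      rw [cw_toInt_lit32 _ (by omega), cw_toInt_lit32 _ (by omega)] at hbr_108376
      omega
    have hA := cw_avail_addr (u.reg .rsp) y (by omega) he_room he_top
    u_loop_back [y - 1]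
    · exact (show X86.User.abiInv s_1083a0 from by v_inv).1
    · exact (show X86.User.abiInv s_1083a0 from by v_inv).2
    · -- still the shadow the prologue left: a dead return address and `available[y]` were written
      rw [w_mem]
      exact Mem.EqOn.step_writeLE _ _ _ (Mem.EqOn.step_writeLE _ _ _ hbody (by u_omega) (by u_omega)) (by omega) (by omega)
    · rw [w_r12, cw_dec_lit32 y (by omega) (by omega)]
    · omega
    · rw [w_r12, cw_dec_lit32 y (by omega) (by omega), cw_cnt_toNat _ (by omega), cw_cnt_toNat _ (by omega)]
      omega

end Vorbis.Spec.compute_codewords_9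

theorem Vorbis.Spec.Worked.compute_codewords_9_ok : Vorbis.Spec.compute_codewords_9.Statement := by
  intro Lay hLay μ hμ u₀ hcode hstore4 others frames Blk u ret i z v hat
  -- the entry state's facts, from the assertion
  have he := hat.entry
  v_entry he
  have hpre := hat.pre
  have hinvB := cw_inv_pushed hpre.shadow he_align he_room he_top
  have h31 := cw_len_le31 hpre hat.i_lt hat.used
  have hilt := hat.i_lt
  have hzle := hat.z_le
  -- the walk, from the fields of `AtProp`
  refine Vorbis.Spec.compute_codewords_9.cw9_walk hLay hμ hcode hstore4 hinvB he_room he_top he_stack i z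
    (u.mem.u8 ((u.reg .rsi).toNat + i)) (usedCount u.mem (u.reg .rsi).toNat (i + 1)) (v.reg .r14)
    hat.rip hat.rbx hat.r12 hat.r13 rfl hat.z_pos (by omega) h31 (cw_kept_all u v) hat.body hat.slot hat.slotM ?_
  -- the exit: `AtMain (i + 1)`
  intro s' hrip hr13 hr12 hslot hsame hbody
  refine ReachVia.done ?_
  refine { entry := hat.entry, pre := hpre, body := hbody, rip := hrip, r13 := ?_, r12 := hr12, slot := hslot, i_le := ?_,
           val := ?_ }
  · rw [hr13]
    exact cw_inc_lit32 i
  · omega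
  · intro hsparse
    refine cw_val_carry hpre he_room he_top hsparse (cw_used_le hpre hsparse (by omega)) (hat.val hsparse) hsame ?_
    intro w hw
    simp only [List.mem_cons, List.not_mem_nil, or_false] at hw
    rcases hw with e | e
    · left
      rw [e]
      show 0x700000 ≤ (u.reg .rsp).toNat - 304 ∧ (u.reg .rsp).toNat - 296 ≤ (u.reg .rsp).toNat + 8
      omega
    · left
      rw [e]
      show 0x700000 ≤ (u.reg .rsp).toNat - 216 ∧ (u.reg .rsp).toNat - 88 ≤ (u.reg .rsp).toNat + 8
      omega
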